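-- pv_equiv track=rewrite | github.com/ilia-abbasi/Python-projects | Linear Algerba Kit/LAK.py | get_num_before
-- ===== SOURCE A (Python) =====
-- nums = ["0","1","2","3","4","5","6","7","8","9","."]
--
-- def get_num_before(s: str,index: int,c=1) -> str:
--     if index == 0:
--         return "0"
--     if s[index - 1] in nums:
--         return str(get_num_before(s,index - 1,c+1) + s[index - 1])
--     if c == 1:
--         return "0"
--     return ""
-- ===== SOURCE B (Python) =====
-- def get_num_before(s: str, index: int, c=1) -> str:
--     if index == 0:
--         return "0"
--     prefix = s[:index]
--     stripped = prefix.rstrip("0123456789.")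
--     if not stripped:
--         return "0" + prefix
--     tail = prefix[len(stripped):]
--     return ("0" if c + len(tail) == 1 else "") + tail
-- ===== Notes on version B (the rewrite author's own statement) =====
-- stated objective: alternative
-- what changed: Replaced A's char-by-char recursion with a closed form: slice the prefix s[:index] once, rstrip its trailing numeric run, and assemble the result from the two lengths (the '0' prefix when the run reaches the start, the c-dependent '0' when the run is empty).
import Mathlib
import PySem

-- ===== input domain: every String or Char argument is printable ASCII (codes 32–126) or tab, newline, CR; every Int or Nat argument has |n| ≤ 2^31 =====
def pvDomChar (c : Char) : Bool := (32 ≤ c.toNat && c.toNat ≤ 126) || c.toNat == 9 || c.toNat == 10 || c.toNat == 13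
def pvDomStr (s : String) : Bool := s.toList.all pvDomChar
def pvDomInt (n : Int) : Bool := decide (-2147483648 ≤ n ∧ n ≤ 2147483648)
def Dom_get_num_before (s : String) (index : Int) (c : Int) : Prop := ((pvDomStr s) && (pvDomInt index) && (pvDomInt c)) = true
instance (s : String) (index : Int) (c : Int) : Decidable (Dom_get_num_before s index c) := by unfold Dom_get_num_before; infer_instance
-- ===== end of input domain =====

-- B replaces A's char-by-char recursion by one slice + rstrip (longest numeric suffix of s[:index]) closed form; equivalence is about the return value only.

-- ===== PORT A =====
-- nums = ["0","1","2","3","4","5","6","7","8","9","."] (membership of the 1-char string = membership of the char)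
def pvNums : List Char := ['0','1','2','3','4','5','6','7','8','9','.']

-- literal recursion of A on the code points; fuel only makes the recursion structural
-- (under Pre_ the fuel never runs out and the pyGet? 'none' (IndexError) branch is never taken)
def goA (s : List Char) (fuel : Nat) (index c : Int) : List Char :=
  match fuel with
  | 0 => []
  | f + 1 =>
    if index = 0 then ['0']
    else
      match PySem.List.pyGet? s (index - 1) with
      | none => []  -- IndexError: excluded by Pre_
      | some ch =>
        if ch ∈ pvNums then goA s f (index - 1) (c + 1) ++ [ch]
        else if c = 1 then ['0'] else []

def get_num_before (s : String) (index : Int) (c : Int) : String :=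
  String.ofList (goA s.toList (s.toList.length + index.natAbs + 1) index c)

-- ===== PORT B =====
-- Source B: prefix = s[:index]; stripped = prefix.rstrip("0123456789."); closed form from the two lengths.
-- rstrip with a chars argument is not a PySem primitive; it is ported exactly, step for step, as
-- dropping the trailing run of those chars (reverse, dropWhile membership, reverse).
def get_num_before_alt (s : String) (index : Int) (c : Int) : String :=
  if index = 0 then "0"
  else
    let pfx := PySem.List.slice s.toList none (some index)         -- s[:index]
    let stripped := (pfx.reverse.dropWhile (fun ch => ch ∈ "0123456789.".toList)).reverse
    if stripped = [] then String.ofList ('0' :: pfx)               -- "0" + prefix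
    else
      let tail := pfx.drop stripped.length                         -- prefix[len(stripped):]
      String.ofList ((if c + (tail.length : Int) = 1 then ['0'] else []) ++ tail)

-- ===== PRECONDITION & SPEC =====
-- Pre_ excludes exactly the inputs where A raises IndexError: index past the end of s, or a
-- negative index whose backward (wraparound) walk runs off the front of an all-numeric prefix.
def Pre_get_num_before (s : String) (index : Int) (c : Int) : Prop :=
  index ≤ (s.toList.length : Int) ∧
    (0 ≤ index ∨ ((1 : Int) - s.toList.length ≤ index ∧
      ∃ ch ∈ s.toList.take ((s.toList.length : Int) + index).toNat, ch ∉ (['0','1','2','3','4','5','6','7','8','9','.'] : List Char)))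
instance (s : String) (index : Int) (c : Int) : Decidable (Pre_get_num_before s index c) := by
  unfold Pre_get_num_before; infer_instance

def pvWitness_get_num_before : String × Int × Int := ("x12", 3, 1)

def Spec_get_num_before (s : String) (index : Int) (c : Int) (out : String) : Prop := out = get_num_before_alt s index c
instance (s : String) (index : Int) (c : Int) (out : String) : Decidable (Spec_get_num_before s index c out) := by unfold Spec_get_num_before; infer_instance

-- ===== CLAIM (what is proved, stated in full; the proofs are below) =====
def Claim_equal_get_num_before : Prop := ∀ (s : String) (index : Int) (c : Int), Dom_get_num_before s index c → Pre_get_num_before s index c → Spec_get_num_before s index c (get_num_before s index c)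

-- ===== LEMMAS AND PROOFS =====

-- the longest numeric suffix of a prefix of s (what rstrip removes is everything before it)
def pvTl (p : List Char) : List Char := (p.reverse.takeWhile (fun ch => ch ∈ pvNums)).reverse

theorem pvNums_eq : "0123456789.".toList = pvNums := by decide

theorem pvTl_append_num (xs : List Char) (ch : Char) (h : ch ∈ pvNums) :
    pvTl (xs ++ [ch]) = pvTl xs ++ [ch] := by
  simp [pvTl, h]

theorem pvTl_append_notnum (xs : List Char) (ch : Char) (h : ch ∉ pvNums) :
    pvTl (xs ++ [ch]) = [] := by
  simp [pvTl, h]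

theorem pvTl_decomp (p : List Char) :
    (p.reverse.dropWhile (fun ch => ch ∈ pvNums)).reverse ++ pvTl p = p := by
  rw [pvTl, ← List.reverse_append, List.takeWhile_append_dropWhile, List.reverse_reverse]

theorem pvTl_mem (p : List Char) : ∀ x ∈ pvTl p, x ∈ pvNums := by
  intro x hx
  rw [pvTl, List.mem_reverse] at hx
  simpa using List.mem_takeWhile_imp hx

-- pyGet? at a negative in-range index reads from the end (Python wraparound)
theorem pvPyGet_neg (l : List Char) (j : Int) (h1 : -(l.length : Int) ≤ j) (h2 : j < 0) :
    PySem.List.pyGet? l j = l[((l.length : Int) + j).toNat]? := by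
  simp only [PySem.List.pyGet?, PySem.List.pyIdx?]
  split
  · omega
  · have h : l.length - (-j).toNat = ((l.length : Int) + j).toNat := by omega
    simp [h]

-- A's recursion at a nonnegative position i evaluates the closed form on take i
theorem goA_pos (l : List Char) (fuel : Nat) : ∀ (i : Nat) (c : Int), i < fuel → i ≤ l.length →
    goA l fuel (i : Int) c =
      (if (pvTl (l.take i)).length = i then '0' :: l.take i
       else (if c + ((pvTl (l.take i)).length : Int) = 1 then ['0'] else []) ++ pvTl (l.take i)) := by
  induction fuel with
  | zero => intro i c hlt _; omega
  | succ f ih =>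
    intro i c hlt hle
    match i with
    | 0 => simp [goA, pvTl]
    | j + 1 =>
      obtain ⟨ch, hj⟩ : ∃ ch, l[j]? = some ch :=
        ⟨l[j]'(by omega), List.getElem?_eq_getElem (by omega)⟩
      have hne : ((j + 1 : Nat) : Int) ≠ 0 := by omega
      have hm1 : (((j + 1 : Nat) : Int) - 1) = ((j : Nat) : Int) := by omega
      have hget : PySem.List.pyGet? l (((j + 1 : Nat) : Int) - 1) = some ch := by
        rw [hm1, PySem.List.pyGet?_natCast, hj]
      have htake : l.take (j + 1) = l.take j ++ [ch] := by
        rw [List.take_add_one, hj]; rfl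
      rw [goA]
      simp only [if_neg hne, hget]
      by_cases hnum : ch ∈ pvNums
      · rw [if_pos hnum, hm1, ih j (c + 1) (by omega) (by omega), htake,
            pvTl_append_num _ _ hnum]
        have hLn : (pvTl (l.take j) ++ [ch]).length = (pvTl (l.take j)).length + 1 := by simp
        rw [hLn]
        by_cases hlen : (pvTl (l.take j)).length = j
        · rw [if_pos hlen, if_pos (by omega)]
          simp
        · rw [if_neg hlen, if_neg (show ¬ (pvTl (l.take j)).length + 1 = j + 1 by omega)]
          by_cases hc : c + 1 + ((pvTl (l.take j)).length : Int) = 1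
          · rw [if_pos hc,
                if_pos (show c + (((pvTl (l.take j)).length + 1 : Nat) : Int) = 1 by push_cast; omega)]
            simp
          · rw [if_neg hc,
                if_neg (show ¬ c + (((pvTl (l.take j)).length + 1 : Nat) : Int) = 1 by push_cast; omega)]
            simp
      · rw [if_neg hnum, htake, pvTl_append_notnum _ _ hnum]
        rw [if_neg (show ¬ ([] : List Char).length = j + 1 by simp)]
        by_cases hc : c = 1 <;> simp [hc]

-- A's recursion at a negative position p - n (a non-numeric char below p) evaluates the same closed form
theorem goA_neg (l : List Char) (fuel : Nat) : ∀ (p : Nat) (c : Int), p < fuel → p < l.length →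
    (∃ ch ∈ l.take p, ch ∉ pvNums) →
    goA l fuel ((p : Int) - l.length) c =
      (if c + ((pvTl (l.take p)).length : Int) = 1 then ['0'] else []) ++ pvTl (l.take p) := by
  induction fuel with
  | zero => intro p c hlt _ _; omega
  | succ f ih =>
    intro p c hlt hle hex
    match p with
    | 0 => simp at hex
    | q + 1 =>
      obtain ⟨ch, hq⟩ : ∃ ch, l[q]? = some ch :=
        ⟨l[q]'(by omega), List.getElem?_eq_getElem (by omega)⟩
      have hne : ((q + 1 : Nat) : Int) - l.length ≠ 0 := by omega
      have hget : PySem.List.pyGet? l ((((q + 1 : Nat) : Int) - l.length) - 1) = some ch := by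
        rw [pvPyGet_neg l _ (by omega) (by omega)]
        have h : ((l.length : Int) + (((q + 1 : Nat) : Int) - l.length - 1)).toNat = q := by omega
        rw [h, hq]
      have htake : l.take (q + 1) = l.take q ++ [ch] := by
        rw [List.take_add_one, hq]; rfl
      rw [goA]
      simp only [if_neg hne, hget]
      by_cases hnum : ch ∈ pvNums
      · have hex' : ∃ x ∈ l.take q, x ∉ pvNums := by
          obtain ⟨x, hx, hnm⟩ := hex
          rw [htake] at hx
          rcases List.mem_append.1 hx with h | h
          · exact ⟨x, h, hnm⟩
          · simp at h; subst h; exact absurd hnum hnm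
        have hrec : (((q + 1 : Nat) : Int) - l.length) - 1 = ((q : Nat) : Int) - l.length := by omega
        rw [if_pos hnum, hrec, ih q (c + 1) (by omega) (by omega) hex', htake,
            pvTl_append_num _ _ hnum]
        have hLn : (pvTl (l.take q) ++ [ch]).length = (pvTl (l.take q)).length + 1 := by simp
        rw [hLn]
        by_cases hc : c + 1 + ((pvTl (l.take q)).length : Int) = 1
        · rw [if_pos hc,
              if_pos (show c + (((pvTl (l.take q)).length + 1 : Nat) : Int) = 1 by push_cast; omega)]
          simp
        · rw [if_neg hc,
              if_neg (show ¬ c + (((pvTl (l.take q)).length + 1 : Nat) : Int) = 1 by push_cast; omega)]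
          simp
      · rw [if_neg hnum, htake, pvTl_append_notnum _ _ hnum]
        by_cases hc : c = 1 <;> simp [hc]

-- B evaluates the same closed form on its prefix take i
theorem alt_eq_closed (s : String) (index c : Int) (i : Nat) (hi : i ≤ s.toList.length)
    (hpfx : PySem.List.slice s.toList none (some index) = s.toList.take i)
    (hiff : index = 0 ↔ i = 0) :
    get_num_before_alt s index c =
      String.ofList (if (pvTl (s.toList.take i)).length = i then '0' :: s.toList.take i
       else (if c + ((pvTl (s.toList.take i)).length : Int) = 1 then ['0'] else []) ++ pvTl (s.toList.take i)) := by
  by_cases h0 : index = 0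
  · have hi0 : i = 0 := hiff.1 h0
    subst hi0
    simp [get_num_before_alt, h0, pvTl]
  · have hi0 : i ≠ 0 := fun h => h0 (hiff.2 h)
    have hlen : (s.toList.take i).length = i := by rw [List.length_take]; omega
    have hdec := pvTl_decomp (s.toList.take i)
    rw [get_num_before_alt, if_neg h0, hpfx]
    simp only [pvNums_eq]
    set strp := ((s.toList.take i).reverse.dropWhile (fun ch => ch ∈ pvNums)).reverse with hstrp
    have hsum : strp.length + (pvTl (s.toList.take i)).length = i := by
      have h := congrArg List.length hdec
      rw [List.length_append, hlen] at h
      exact h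
    have hdrop : (s.toList.take i).drop strp.length = pvTl (s.toList.take i) := by
      conv_lhs => rw [← hdec]
      exact List.drop_left
    by_cases hs : strp = []
    · have h : (pvTl (s.toList.take i)).length = i := by
        rw [hs] at hsum; simpa using hsum
      rw [if_pos hs, if_pos h]
    · have hne : (pvTl (s.toList.take i)).length ≠ i := by
        intro h
        apply hs
        rw [h] at hsum
        exact List.eq_nil_of_length_eq_zero (by omega)
      rw [if_neg hs, if_neg hne, hdrop]

-- ===== VERDICT (by name: the statement is the Claim_ definition above) =====
theorem get_num_before_spec : Claim_equal_get_num_before := by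
  intro s index c _ hpre
  obtain ⟨h1, h2⟩ := hpre
  unfold Spec_get_num_before get_num_before
  by_cases hpos : 0 ≤ index
  · obtain ⟨i, rfl⟩ : ∃ i : Nat, index = (i : Int) := ⟨index.toNat, by omega⟩
    have hi : i ≤ s.toList.length := by omega
    rw [goA_pos s.toList _ i c (by omega) hi,
        alt_eq_closed s _ c i hi (PySem.List.slice_to_natCast s.toList i)
          (by constructor <;> intro h <;> omega)]
  · rcases h2 with h2 | ⟨h2a, hex⟩
    · omega
    · generalize hp : ((s.toList.length : Int) + index).toNat = p at hex
      have hidx : index = (p : Int) - s.toList.length := by omega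
      have hpn : p < s.toList.length := by omega
      have hp1 : p ≠ 0 := by
        rintro rfl
        simp at hex
      rw [hidx, goA_neg s.toList _ p c (by omega) hpn hex,
          alt_eq_closed s _ c p (by omega) ?_ (by constructor <;> intro h <;> omega)]
      · have hne : (pvTl (s.toList.take p)).length ≠ p := by
          intro h
          obtain ⟨x, hx, hnm⟩ := hex
          have heq : pvTl (s.toList.take p) = s.toList.take p := by
            have hsuf : pvTl (s.toList.take p) <:+ s.toList.take p :=
              ⟨_, pvTl_decomp (s.toList.take p)⟩
            exact hsuf.sublist.eq_of_length (by rw [h, List.length_take]; omega)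
          exact hnm (pvTl_mem _ x (heq ▸ hx))
        rw [if_neg hne]
      · have hik : ((p : Int) - s.toList.length) = -((s.toList.length - p : Nat) : Int) := by omega
        rw [hik, PySem.List.slice_to_neg_natCast s.toList (s.toList.length - p) (by omega)]
        congr 1
        omega
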